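-- pv_equiv track=rewrite | github.com/gugafreitas/PL2024 | TPC3/tpc3.py | sum_digits_no_regex
-- ===== SOURCE A (Python) =====
-- def sum_digits_no_regex(text: str):
--     digit_sum = 0
--     current_num = ''
--     for char in text:
--         if char.isdigit():
--             current_num += char
--         else:
--             if current_num:
--                 digit_sum += int(current_num)
--                 current_num = ''
--     if current_num:
--         digit_sum += int(current_num)
--     return digit_sum
-- ===== SOURCE B (Python) =====
-- def sum_digits_no_regex(text: str):
--     total = 0
--     i = 0
--     n = len(text)
--     while i < n:
--         if text[i].isdigit():
--             j = i
--             while j < n and text[j].isdigit():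
--                 j += 1
--             total += int(text[i:j])
--             i = j
--         else:
--             i += 1
--     return total
-- ===== Notes on version B (the rewrite author's own statement) =====
-- stated objective: alternative
-- what changed: B scans the string run-by-run with an index and an inner digit-run scan, converting each maximal digit slice directly, instead of A's per-character state machine with a current_num accumulator and post-loop flush.
import Mathlib
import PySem

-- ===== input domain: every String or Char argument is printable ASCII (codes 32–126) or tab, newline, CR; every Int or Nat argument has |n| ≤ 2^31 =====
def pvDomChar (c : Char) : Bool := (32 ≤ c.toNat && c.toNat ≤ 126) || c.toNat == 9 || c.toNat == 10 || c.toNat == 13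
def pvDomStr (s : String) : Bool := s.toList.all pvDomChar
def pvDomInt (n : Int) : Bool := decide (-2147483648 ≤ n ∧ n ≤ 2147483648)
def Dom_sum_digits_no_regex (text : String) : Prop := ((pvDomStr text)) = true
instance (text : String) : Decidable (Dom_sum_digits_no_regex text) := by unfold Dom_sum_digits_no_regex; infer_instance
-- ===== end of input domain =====

-- B replaces A's per-character state machine (current_num accumulator + post-loop flush)
-- by an index scan over maximal digit runs, converting each run slice directly; same cost.


-- ===== PORT A =====
-- int(s) on a (nonempty, all-digit) run; getD 0 is only a totality guard, never hit
def pvInt (cs : List Char) : Int := (PySem.Int.ofChars? cs).getD 0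

def aStep (st : Int × List Char) (c : Char) : Int × List Char :=
  if PySem.Chars.isdigit c then (st.1, st.2 ++ [c])
  else if st.2 ≠ [] then (st.1 + pvInt st.2, []) else st

def sum_digits_no_regex (text : String) : Int :=
  let st := text.toList.foldl aStep (0, [])
  if st.2 ≠ [] then st.1 + pvInt st.2 else st.1

-- ===== PORT B =====
-- B's outer while over runs: skip a non-digit, or consume a whole digit run at once
def altGo : List Char → Int
  | [] => 0
  | c :: rest =>
    if PySem.Chars.isdigit c then
      pvInt ((c :: rest).takeWhile PySem.Chars.isdigit)
        + altGo ((c :: rest).dropWhile PySem.Chars.isdigit)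
    else altGo rest
termination_by cs => cs.length
decreasing_by
  · rename_i hdig
    simp only [List.dropWhile_cons, hdig, if_pos, List.length_cons]
    exact Nat.lt_succ_of_le (List.length_dropWhile_le _ _)
  · simp

def sum_digits_no_regex_alt (text : String) : Int := altGo text.toList

-- ===== PRECONDITION & SPEC =====
def Spec_sum_digits_no_regex (text : String) (out : Int) : Prop := out = sum_digits_no_regex_alt text
instance (text : String) (out : Int) : Decidable (Spec_sum_digits_no_regex text out) := by unfold Spec_sum_digits_no_regex; infer_instance

-- ===== CLAIM (what is proved, stated in full; the proofs are below) =====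
def Claim_equal_sum_digits_no_regex : Prop := ∀ (text : String), Dom_sum_digits_no_regex text → Spec_sum_digits_no_regex text (sum_digits_no_regex text)

-- ===== LEMMAS AND PROOFS =====
def aFinish (st : Int × List Char) : Int := if st.2 ≠ [] then st.1 + pvInt st.2 else st.1

theorem takeWhile_append_of_all {p : Char → Bool} {cur rest : List Char}
    (h : ∀ a ∈ cur, p a = true) : (cur ++ rest).takeWhile p = cur ++ rest.takeWhile p := by
  induction cur with
  | nil => simp
  | cons d ds ih =>
    simp only [List.cons_append, List.takeWhile_cons, h d (by simp), if_pos]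
    simp [ih (fun a ha => h a (by simp [ha]))]

theorem dropWhile_append_of_all {p : Char → Bool} {cur rest : List Char}
    (h : ∀ a ∈ cur, p a = true) : (cur ++ rest).dropWhile p = rest.dropWhile p := by
  induction cur with
  | nil => simp
  | cons d ds ih =>
    simp only [List.cons_append, List.dropWhile_cons, h d (by simp), if_pos]
    exact ih (fun a ha => h a (by simp [ha]))

theorem altGo_all_digits {cur : List Char} (hne : cur ≠ [])
    (h : ∀ a ∈ cur, PySem.Chars.isdigit a = true) : altGo cur = pvInt cur := by
  cases cur with
  | nil => exact absurd rfl hne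
  | cons c cs =>
    rw [altGo]
    have hc : PySem.Chars.isdigit c = true := h c (by simp)
    rw [if_pos hc]
    have ht : (c :: cs).takeWhile PySem.Chars.isdigit = c :: cs := by
      have := takeWhile_append_of_all (rest := ([] : List Char)) h
      simpa using this
    have hd : (c :: cs).dropWhile PySem.Chars.isdigit = [] := by
      have := dropWhile_append_of_all (rest := ([] : List Char)) h
      simpa using this
    rw [ht, hd, altGo]
    ring

theorem altGo_run {cur rest : List Char} (hne : cur ≠ [])
    (h : ∀ a ∈ cur, PySem.Chars.isdigit a = true)
    (c : Char) (hc : PySem.Chars.isdigit c = false) :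
    altGo (cur ++ c :: rest) = pvInt cur + altGo rest := by
  cases cur with
  | nil => exact absurd rfl hne
  | cons d ds =>
    rw [List.cons_append, altGo, if_pos (h d (by simp))]
    have key : d :: (ds ++ c :: rest) = (d :: ds) ++ c :: rest := rfl
    rw [key, takeWhile_append_of_all h, dropWhile_append_of_all h]
    simp [hc, altGo]

theorem loop_eq (l : List Char) : ∀ (s : Int) (cur : List Char),
    (∀ a ∈ cur, PySem.Chars.isdigit a = true) →
    aFinish (l.foldl aStep (s, cur)) = s + altGo (cur ++ l) := by
  induction l with
  | nil =>
    intro s cur h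
    simp only [List.foldl_nil, List.append_nil, aFinish]
    cases cur with
    | nil => simp [altGo]
    | cons c cs => simp [altGo_all_digits (by simp) h]
  | cons c t ih =>
    intro s cur h
    rw [List.foldl_cons]
    by_cases hc : PySem.Chars.isdigit c = true
    · have : aStep (s, cur) c = (s, cur ++ [c]) := by simp [aStep, hc]
      rw [this, ih s (cur ++ [c]) (by
        intro a ha
        rcases List.mem_append.mp ha with h1 | h1
        · exact h a h1
        · simp at h1; subst h1; exact hc)]
      simp
    · have hc' : PySem.Chars.isdigit c = false := by simpa using hc
      cases cur with
      | nil =>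
        have : aStep (s, ([] : List Char)) c = (s, []) := by simp [aStep, hc']
        rw [this, ih s [] (by simp)]
        simp [altGo, hc']
      | cons d ds =>
        have : aStep (s, d :: ds) c = (s + pvInt (d :: ds), []) := by
          simp [aStep, hc']
        rw [this, ih (s + pvInt (d :: ds)) [] (by simp)]
        rw [altGo_run (by simp) h c hc']
        simp; ring

-- ===== VERDICT (by name: the statement is the Claim_ definition above) =====
theorem sum_digits_no_regex_spec : Claim_equal_sum_digits_no_regex := by
  intro text _
  unfold Spec_sum_digits_no_regex sum_digits_no_regex sum_digits_no_regex_alt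
  have := loop_eq text.toList 0 [] (by simp)
  simpa [aFinish] using this
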